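-- pv_equiv track=rewrite | github.com/dkawalecc/CAPTCHA-authorization-application | backend/recognize_text_from_speech.py | response_match_tescase
-- ===== SOURCE A (Python) =====
-- MAX_DISTANCE = 3
--
-- def edit_distance(s1, s2):
--     m = len(s1) + 1
--     n = len(s2) + 1
--
--     tbl = {}
--     for i in range(m): tbl[i, 0] = i
--     for j in range(n): tbl[0, j] = j
--     for i in range(1, m):
--         for j in range(1, n):
--             cost = 0 if s1[i - 1] == s2[j - 1] else 1
--             tbl[i, j] = min(tbl[i, j - 1] + 1, tbl[i - 1, j] + 1, tbl[i - 1, j - 1] + cost)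
--
--     return tbl[i, j]
--
-- def response_match_tescase(response, testcase):
--     tokens1 = response.split(' ')
--     tokens2 = testcase.split(' ')
--     if len(tokens1) != len(tokens2):
--         return False
--     for i in range(len(tokens1)):
--         if edit_distance(tokens1[i], tokens2[i]) > MAX_DISTANCE:
--             return False
--     return True
-- ===== SOURCE B (Python) =====
-- MAX_DISTANCE = 3
--
-- def _within(s1, s2, k):
--     # branch-and-bound: trim a common suffix, then try delete/insert/substitute
--     # on the last characters with a decremented budget (no DP table at all)
--     while s1 and s2 and s1[-1] == s2[-1]:
--         s1 = s1[:-1]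
--         s2 = s2[:-1]
--     if not s1:
--         return len(s2) <= k
--     if not s2:
--         return len(s1) <= k
--     if k <= 0:
--         return False
--     return (_within(s1[:-1], s2, k - 1)
--             or _within(s1, s2[:-1], k - 1)
--             or _within(s1[:-1], s2[:-1], k - 1))
--
-- def response_match_tescase(response, testcase):
--     tokens1 = response.split(' ')
--     tokens2 = testcase.split(' ')
--     if len(tokens1) != len(tokens2):
--         return False
--     return all(_within(a, b, MAX_DISTANCE) for a, b in zip(tokens1, tokens2))
-- ===== Notes on version B (the rewrite author's own statement) =====
-- stated objective: faster
-- what changed: Replaces the full dict-of-(i,j)-keys Levenshtein DP table by a branch-and-bound search: trim the common suffix in a loop, then recursively try delete/insert/substitute on the last characters with a budget that starts at MAX_DISTANCE and decreases, so no table is ever built; the token lists are zipped instead of indexed.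
import Mathlib
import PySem

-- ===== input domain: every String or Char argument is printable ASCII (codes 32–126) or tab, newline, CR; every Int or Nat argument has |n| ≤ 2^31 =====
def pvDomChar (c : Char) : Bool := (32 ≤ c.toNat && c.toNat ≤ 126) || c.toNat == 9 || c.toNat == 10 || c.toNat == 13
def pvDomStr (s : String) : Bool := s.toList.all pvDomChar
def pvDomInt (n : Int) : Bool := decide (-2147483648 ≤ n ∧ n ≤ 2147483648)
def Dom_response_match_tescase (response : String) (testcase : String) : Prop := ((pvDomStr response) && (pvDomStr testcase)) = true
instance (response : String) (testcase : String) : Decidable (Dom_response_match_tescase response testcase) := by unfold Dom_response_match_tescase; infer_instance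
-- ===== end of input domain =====

-- B replaces A's dict-based Levenshtein DP table by a branch-and-bound search:
-- trim a common suffix, then try delete/insert/substitute on the last characters with a
-- decremented budget (no table at all); the token lists are zipped instead of indexed.

-- ===== PORT A =====
-- edit_distance's inner-loop body: tbl[i, j] = min(tbl[i, j-1]+1, tbl[i-1, j]+1, tbl[i-1, j-1]+cost).
-- tbl[...] reads are ported as Dict.getD _ _ 0: every key read was written before it is read
-- (row 0 / column 0 by the init loops, interior cells in row-major order), so the default is never
-- used and Python's KeyError is unreachable; likewise s1[i-1] / s2[j-1] are always in range.
def stepA (s1 s2 : List Char) (i : Int) (d : PySem.Dict (Int × Int) Int) (j : Int) :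
    PySem.Dict (Int × Int) Int :=
  let cost : Int := if PySem.List.pyGetD s1 (i - 1) ' ' = PySem.List.pyGetD s2 (j - 1) ' ' then 0 else 1
  d.insert (i, j)
    (min (min (d.getD (i, j - 1) 0 + 1) (d.getD (i - 1, j) 0 + 1)) (d.getD (i - 1, j - 1) 0 + cost))

-- edit_distance: the Python returns tbl[i, j] with the loop variables i, j LEAKED from the
-- for-loops, so the port threads the current i and j through every fold.
def editDistanceA (s1 s2 : List Char) : Int :=
  let m : Int := (s1.length : Int) + 1
  let n : Int := (s2.length : Int) + 1
  -- for i in range(m): tbl[i, 0] = i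
  let st1 : PySem.Dict (Int × Int) Int × Int :=
    (PySem.List.pyRange 0 m 1).foldl (fun p i => (p.1.insert (i, 0) i, i)) (PySem.Dict.empty, 0)
  -- for j in range(n): tbl[0, j] = j
  let st2 : PySem.Dict (Int × Int) Int × Int :=
    (PySem.List.pyRange 0 n 1).foldl (fun p j => (p.1.insert (0, j) j, j)) (st1.1, 0)
  -- for i in range(1, m): for j in range(1, n): tbl[i, j] = …
  let st3 : PySem.Dict (Int × Int) Int × Int × Int :=
    (PySem.List.pyRange 1 m 1).foldl
      (fun p i =>
        let inner : PySem.Dict (Int × Int) Int × Int :=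
          (PySem.List.pyRange 1 n 1).foldl (fun q j => (stepA s1 s2 i q.1 j, j)) (p.1, p.2.2)
        (inner.1, i, inner.2))
      (st2.1, st1.2, st2.2)
  st3.1.getD (st3.2.1, st3.2.2) 0

-- for i in range(len(tokens1)): if edit_distance(...) > MAX_DISTANCE: return False  /  return True
def loopA (tokens1 tokens2 : List (List Char)) : List Int → Bool
  | [] => true
  | i :: rest =>
      if editDistanceA (PySem.List.pyGetD tokens1 i []) (PySem.List.pyGetD tokens2 i []) > 3 then false
      else loopA tokens1 tokens2 rest

def response_match_tescase (response : String) (testcase : String) : Bool :=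
  let tokens1 := PySem.Chars.splitOn response.toList [' ']
  let tokens2 := PySem.Chars.splitOn testcase.toList [' ']
  if tokens1.length ≠ tokens2.length then false
  else loopA tokens1 tokens2 (PySem.List.pyRange 0 (tokens1.length : Int) 1)

-- ===== PORT B =====
-- the while loop of _within: trim the common suffix (s1[-1] == s2[-1] → drop both last chars)
def trimB (s1 s2 : List Char) : List Char × List Char :=
  if h : s1 ≠ [] ∧ s2 ≠ [] ∧ PySem.List.pyGetD s1 (-1) ' ' = PySem.List.pyGetD s2 (-1) ' ' then
    trimB (PySem.List.slice s1 none (some (-1))) (PySem.List.slice s2 none (some (-1)))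
  else (s1, s2)
  termination_by s1.length
  decreasing_by
    rw [PySem.List.slice_to_neg_one]
    have : s1 ≠ [] := h.1
    cases s1 with
    | nil => exact absurd rfl this
    | cons a l => simp

-- _within from Source B: after trimming, branch on delete / insert / substitute with budget k-1
def withinB (s1 s2 : List Char) (k : Int) : Bool :=
  let p := trimB s1 s2
  if p.1 = [] then decide ((p.2.length : Int) ≤ k)
  else if p.2 = [] then decide ((p.1.length : Int) ≤ k)
  else if k ≤ 0 then false
  else
    withinB (PySem.List.slice p.1 none (some (-1))) p.2 (k - 1) ||
    withinB p.1 (PySem.List.slice p.2 none (some (-1))) (k - 1) ||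
    withinB (PySem.List.slice p.1 none (some (-1))) (PySem.List.slice p.2 none (some (-1))) (k - 1)
  termination_by k.toNat
  decreasing_by all_goals omega

def response_match_tescase_alt (response : String) (testcase : String) : Bool :=
  let tokens1 := PySem.Chars.splitOn response.toList [' ']
  let tokens2 := PySem.Chars.splitOn testcase.toList [' ']
  if tokens1.length ≠ tokens2.length then false
  else (tokens1.zip tokens2).all (fun p => withinB p.1 p.2 3)

-- ===== PRECONDITION & SPEC =====
def Spec_response_match_tescase (response : String) (testcase : String) (out : Bool) : Prop := out = response_match_tescase_alt response testcase
instance (response : String) (testcase : String) (out : Bool) : Decidable (Spec_response_match_tescase response testcase out) := by unfold Spec_response_match_tescase; infer_instance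

-- ===== CLAIM (what is proved, stated in full; the proofs are below) =====
def Claim_equal_response_match_tescase : Prop := ∀ (response : String) (testcase : String), Dom_response_match_tescase response testcase → Spec_response_match_tescase response testcase (response_match_tescase response testcase)

-- ===== LEMMAS AND PROOFS =====

def dref (s1 s2 : List Char) : Nat → Nat → Int
  | 0, j => (j : Int)
  | i + 1, 0 => (i : Int) + 1
  | i + 1, j + 1 =>
      let cost : Int := if s1.getD i ' ' = s2.getD j ' ' then 0 else 1
      min (min (dref s1 s2 (i + 1) j + 1) (dref s1 s2 i (j + 1) + 1)) (dref s1 s2 i j + cost)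
  termination_by i j => (i, j)

lemma dref_zero (s1 s2 : List Char) (j : Nat) : dref s1 s2 0 j = (j : Int) := by simp [dref]
lemma dref_zero' (s1 s2 : List Char) (i : Nat) : dref s1 s2 i 0 = (i : Int) := by
  cases i with
  | zero => simp [dref]
  | succ i => simp only [dref]; push_cast; ring

lemma dref_succ_succ (s1 s2 : List Char) (i j : Nat) :
    dref s1 s2 (i + 1) (j + 1)
      = min (min (dref s1 s2 (i + 1) j + 1) (dref s1 s2 i (j + 1) + 1))
          (dref s1 s2 i j + (if s1.getD i ' ' = s2.getD j ' ' then 0 else 1)) := by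
  rw [dref]

lemma dref_lb (s1 s2 : List Char) (i j : Nat) :
    (i : Int) - (j : Int) ≤ dref s1 s2 i j ∧ (j : Int) - (i : Int) ≤ dref s1 s2 i j := by
  induction i, j using dref.induct s1 s2 with
  | case1 j => simp only [dref]; omega
  | case2 i => simp only [dref]; push_cast; omega
  | case3 i j ih1 ih2 ih3 =>
      simp only [dref]
      push_cast
      split_ifs <;> omega

lemma dref_nonneg (s1 s2 : List Char) (i j : Nat) : 0 ≤ dref s1 s2 i j := by
  have := dref_lb s1 s2 i j
  omega

-- DP cell increases by at most 1 along each axis (forward direction is a recurrence term)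
lemma dref_le_succ_left (s1 s2 : List Char) (i j : Nat) :
    dref s1 s2 (i + 1) j ≤ dref s1 s2 i j + 1 := by
  cases j with
  | zero => rw [dref_zero', dref_zero']; push_cast; omega
  | succ j => rw [dref_succ_succ]; omega

lemma dref_le_succ_right (s1 s2 : List Char) (i j : Nat) :
    dref s1 s2 i (j + 1) ≤ dref s1 s2 i j + 1 := by
  cases i with
  | zero => rw [dref_zero, dref_zero]; push_cast; omega
  | succ i => rw [dref_succ_succ]; omega

-- ... and decreases by at most 1 (the nontrivial direction), by strong induction on i+j
lemma dref_adj (s1 s2 : List Char) :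
    ∀ (n i j : Nat), i + j ≤ n →
      dref s1 s2 i j ≤ dref s1 s2 (i + 1) j + 1 ∧ dref s1 s2 i j ≤ dref s1 s2 i (j + 1) + 1 := by
  intro n
  induction n with
  | zero =>
      intro i j h
      have hi : i = 0 := by omega
      have hj : j = 0 := by omega
      subst hi hj
      rw [dref_zero, dref_zero', dref_zero]
      norm_num
  | succ n ih =>
      intro i j h
      by_cases hn : i + j ≤ n
      · exact ih i j hn
      cases i with
      | zero =>
          cases j with
          | zero => exact ih 0 0 (by omega)
          | succ j =>
              constructor
              · rw [dref_zero]
                have := (dref_lb s1 s2 1 (j + 1)).2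
                push_cast at this ⊢
                omega
              · rw [dref_zero, dref_zero]
                push_cast
                omega
      | succ i =>
          cases j with
          | zero =>
              constructor
              · rw [dref_zero', dref_zero']
                push_cast
                omega
              · rw [dref_zero']
                have := (dref_lb s1 s2 (i + 1) 1).1
                push_cast at this ⊢
                omega
          | succ j =>
              constructor
              · -- dref (i+1)(j+1) ≤ dref (i+2)(j+1) + 1
                rw [dref_succ_succ s1 s2 (i + 1) j]
                have h1 : dref s1 s2 (i + 1) (j + 1) ≤ dref s1 s2 (i + 1) j + 1 :=
                  dref_le_succ_right s1 s2 (i + 1) j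
                have h2 : dref s1 s2 (i + 1) j ≤ dref s1 s2 (i + 1 + 1) j + 1 :=
                  (ih (i + 1) j (by omega)).1
                split_ifs <;> omega
              · -- dref (i+1)(j+1) ≤ dref (i+1)(j+2) + 1
                rw [dref_succ_succ s1 s2 i (j + 1)]
                have h1 : dref s1 s2 (i + 1) (j + 1) ≤ dref s1 s2 i (j + 1) + 1 :=
                  dref_le_succ_left s1 s2 i (j + 1)
                have h2 : dref s1 s2 i (j + 1) ≤ dref s1 s2 i (j + 1 + 1) + 1 :=
                  (ih i (j + 1) (by omega)).2
                split_ifs <;> omega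

-- equal last characters: the DP moves along the diagonal exactly
lemma dref_diag (s1 s2 : List Char) (i j : Nat) (h : s1.getD i ' ' = s2.getD j ' ') :
    dref s1 s2 (i + 1) (j + 1) = dref s1 s2 i j := by
  rw [dref_succ_succ, if_pos h]
  have h1 := (dref_adj s1 s2 (i + j) i j (le_refl _)).1
  have h2 := (dref_adj s1 s2 (i + j) i j (le_refl _)).2
  omega

-- dref only reads the first i / j characters
lemma dref_congr (s1 s2 s1' s2' : List Char) :
    ∀ i j, (∀ a, a < i → s1.getD a ' ' = s1'.getD a ' ') →
      (∀ b, b < j → s2.getD b ' ' = s2'.getD b ' ') →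
      dref s1 s2 i j = dref s1' s2' i j := by
  intro i j
  induction i, j using dref.induct s1 s2 with
  | case1 j => intro _ _; rw [dref_zero, dref_zero]
  | case2 i => intro _ _; rw [dref_zero', dref_zero']
  | case3 i j ih1 ih2 ih3 =>
      intro h1 h2
      rw [dref_succ_succ, dref_succ_succ,
        ih1 h1 (fun b hb => h2 b (by omega)),
        ih2 (fun a ha => h1 a (by omega)) h2,
        ih3 (fun a ha => h1 a (by omega)) (fun b hb => h2 b (by omega)),
        h1 i (by omega), h2 j (by omega)]

lemma getD_dropLast (l : List Char) (a : Nat) (h : a < l.length - 1) :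
    l.dropLast.getD a ' ' = l.getD a ' ' := by
  rw [List.getD_eq_getElem?_getD, List.getD_eq_getElem?_getD,
    List.getElem?_dropLast, if_pos (by omega)]

lemma dref_dropLast_left (s1 s2 : List Char) (j : Nat) (h : s1 ≠ []) :
    dref s1.dropLast s2 s1.dropLast.length j = dref s1 s2 (s1.length - 1) j := by
  rw [List.length_dropLast]
  exact dref_congr _ _ _ _ _ _ (fun a ha => getD_dropLast s1 a ha) (fun b _ => rfl)

lemma dref_dropLast_right (s1 s2 : List Char) (i : Nat) (h : s2 ≠ []) :
    dref s1 s2.dropLast i s2.dropLast.length = dref s1 s2 i (s2.length - 1) := by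
  rw [List.length_dropLast]
  exact dref_congr _ _ _ _ _ _ (fun a _ => rfl) (fun b hb => getD_dropLast s2 b hb)

lemma dref_dropLast_both (s1 s2 : List Char) (h1 : s1 ≠ []) (h2 : s2 ≠ []) :
    dref s1.dropLast s2.dropLast s1.dropLast.length s2.dropLast.length
      = dref s1 s2 (s1.length - 1) (s2.length - 1) := by
  rw [List.length_dropLast, List.length_dropLast]
  exact dref_congr _ _ _ _ _ _ (fun a ha => getD_dropLast s1 a ha)
    (fun b hb => getD_dropLast s2 b hb)

lemma getLast_eq_getD (l : List Char) (h : l ≠ []) :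
    l.getLast h = l.getD (l.length - 1) ' ' := by
  rw [List.getLast_eq_getElem, List.getD_eq_getElem _ _ (by
    cases l with
    | nil => exact absurd rfl h
    | cons a t => simp)]

-- the trimming loop preserves the full-prefix DP value and ends in a base or mismatch state
lemma trimB_spec (s1 s2 : List Char) :
    dref (trimB s1 s2).1 (trimB s1 s2).2 (trimB s1 s2).1.length (trimB s1 s2).2.length
        = dref s1 s2 s1.length s2.length
      ∧ ((trimB s1 s2).1 = [] ∨ (trimB s1 s2).2 = [] ∨
          PySem.List.pyGetD (trimB s1 s2).1 (-1) ' ' ≠ PySem.List.pyGetD (trimB s1 s2).2 (-1) ' ') := by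
  induction s1, s2 using trimB.induct with
  | case1 s1 s2 h ih =>
      obtain ⟨hne1, hne2, heq⟩ := h
      rw [trimB, dif_pos ⟨hne1, hne2, heq⟩]
      refine ⟨?_, ih.2⟩
      rw [ih.1]
      rw [PySem.List.slice_to_neg_one, PySem.List.slice_to_neg_one]
      rw [dref_dropLast_both s1 s2 hne1 hne2]
      have hl1 : 1 ≤ s1.length := by
        cases s1 with
        | nil => exact absurd rfl hne1
        | cons a t => simp
      have hl2 : 1 ≤ s2.length := by
        cases s2 with
        | nil => exact absurd rfl hne2
        | cons a t => simp
      have hchar : s1.getD (s1.length - 1) ' ' = s2.getD (s2.length - 1) ' ' := by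
        rw [← getLast_eq_getD s1 hne1, ← getLast_eq_getD s2 hne2]
        rw [PySem.List.pyGetD_neg_one _ _ hne1, PySem.List.pyGetD_neg_one _ _ hne2] at heq
        exact heq
      have := dref_diag s1 s2 (s1.length - 1) (s2.length - 1) hchar
      rw [show s1.length - 1 + 1 = s1.length from by omega,
        show s2.length - 1 + 1 = s2.length from by omega] at this
      omega
  | case2 s1 s2 h =>
      rw [trimB, dif_neg h]
      refine ⟨rfl, ?_⟩
      by_cases e1 : s1 = []
      · exact Or.inl e1
      by_cases e2 : s2 = []
      · exact Or.inr (Or.inl e2)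
      exact Or.inr (Or.inr fun he => h ⟨e1, e2, he⟩)

-- the branch-and-bound search decides 'edit distance ≤ k'
lemma withinB_eq (n : Nat) : ∀ (s1 s2 : List Char) (k : Int), k.toNat ≤ n →
    withinB s1 s2 k = decide (dref s1 s2 s1.length s2.length ≤ k) := by
  induction n with
  | zero =>
      intro s1 s2 k hk
      obtain ⟨heq, hcase⟩ := trimB_spec s1 s2
      rw [withinB, ← heq]
      by_cases h1 : (trimB s1 s2).1 = []
      · rw [if_pos h1, h1]
        simp [dref_zero]
      rw [if_neg h1]
      by_cases h2 : (trimB s1 s2).2 = []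
      · rw [if_pos h2, h2]
        simp [dref_zero']
      rw [if_neg h2, if_pos (show k ≤ 0 by omega)]
      have hmm : PySem.List.pyGetD (trimB s1 s2).1 (-1) ' ' ≠ PySem.List.pyGetD (trimB s1 s2).2 (-1) ' ' := by
        rcases hcase with h | h | h
        · exact absurd h h1
        · exact absurd h h2
        · exact h
      obtain ⟨a, t1, hT1⟩ := List.exists_cons_of_ne_nil h1
      obtain ⟨b, t2, hT2⟩ := List.exists_cons_of_ne_nil h2
      have hlen1 : (trimB s1 s2).1.length = t1.length + 1 := by rw [hT1]; simp
      have hlen2 : (trimB s1 s2).2.length = t2.length + 1 := by rw [hT2]; simp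
      rw [hlen1, hlen2, dref_succ_succ]
      have hc : (trimB s1 s2).1.getD t1.length ' ' ≠ (trimB s1 s2).2.getD t2.length ' ' := by
        rw [PySem.List.pyGetD_neg_one _ _ h1, PySem.List.pyGetD_neg_one _ _ h2] at hmm
        rw [getLast_eq_getD _ h1, getLast_eq_getD _ h2, hlen1, hlen2] at hmm
        simpa using hmm
      rw [if_neg hc]
      have n1 := dref_nonneg (trimB s1 s2).1 (trimB s1 s2).2 (t1.length + 1) t2.length
      have n2 := dref_nonneg (trimB s1 s2).1 (trimB s1 s2).2 t1.length (t2.length + 1)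
      have n3 := dref_nonneg (trimB s1 s2).1 (trimB s1 s2).2 t1.length t2.length
      symm
      simp only [decide_eq_false_iff_not, not_le]
      omega
  | succ n ih =>
      intro s1 s2 k hk
      obtain ⟨heq, hcase⟩ := trimB_spec s1 s2
      rw [withinB, ← heq]
      by_cases h1 : (trimB s1 s2).1 = []
      · rw [if_pos h1, h1]
        simp [dref_zero]
      rw [if_neg h1]
      by_cases h2 : (trimB s1 s2).2 = []
      · rw [if_pos h2, h2]
        simp [dref_zero']
      rw [if_neg h2]
      obtain ⟨a, t1, hT1⟩ := List.exists_cons_of_ne_nil h1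
      obtain ⟨b, t2, hT2⟩ := List.exists_cons_of_ne_nil h2
      have hlen1 : (trimB s1 s2).1.length = t1.length + 1 := by rw [hT1]; simp
      have hlen2 : (trimB s1 s2).2.length = t2.length + 1 := by rw [hT2]; simp
      have hmm : PySem.List.pyGetD (trimB s1 s2).1 (-1) ' ' ≠ PySem.List.pyGetD (trimB s1 s2).2 (-1) ' ' := by
        rcases hcase with h | h | h
        · exact absurd h h1
        · exact absurd h h2
        · exact h
      have hc : (trimB s1 s2).1.getD t1.length ' ' ≠ (trimB s1 s2).2.getD t2.length ' ' := by
        rw [PySem.List.pyGetD_neg_one _ _ h1, PySem.List.pyGetD_neg_one _ _ h2] at hmm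
        rw [getLast_eq_getD _ h1, getLast_eq_getD _ h2, hlen1, hlen2] at hmm
        simpa using hmm
      have hdd : dref (trimB s1 s2).1 (trimB s1 s2).2 (t1.length + 1) (t2.length + 1)
          = min (min (dref (trimB s1 s2).1 (trimB s1 s2).2 (t1.length + 1) t2.length + 1)
                     (dref (trimB s1 s2).1 (trimB s1 s2).2 t1.length (t2.length + 1) + 1))
              (dref (trimB s1 s2).1 (trimB s1 s2).2 t1.length t2.length + 1) := by
        rw [dref_succ_succ, if_neg hc]
      by_cases hk0 : k ≤ 0
      · rw [if_pos hk0, hlen1, hlen2, hdd]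
        have n1 := dref_nonneg (trimB s1 s2).1 (trimB s1 s2).2 (t1.length + 1) t2.length
        have n2 := dref_nonneg (trimB s1 s2).1 (trimB s1 s2).2 t1.length (t2.length + 1)
        have n3 := dref_nonneg (trimB s1 s2).1 (trimB s1 s2).2 t1.length t2.length
        symm
        simp only [decide_eq_false_iff_not, not_le]
        omega
      · rw [if_neg hk0]
        rw [PySem.List.slice_to_neg_one, PySem.List.slice_to_neg_one]
        rw [ih _ _ (k - 1) (by omega), ih _ _ (k - 1) (by omega), ih _ _ (k - 1) (by omega)]
        rw [dref_dropLast_left _ _ _ h1, dref_dropLast_right _ _ _ h2,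
          dref_dropLast_both _ _ h1 h2]
        rw [hlen1, hlen2]
        simp only [Nat.add_sub_cancel]
        rw [hdd]
        simp only [← Bool.decide_or]
        apply decide_eq_decide.mpr
        omega

-- ---- top level ----
lemma loopA_eq_all (t1 t2 : List (List Char)) (l : List Int) :
    loopA t1 t2 l
      = l.all (fun i => !(editDistanceA (PySem.List.pyGetD t1 i []) (PySem.List.pyGetD t2 i []) > 3)) := by
  induction l with
  | nil => rfl
  | cons a l ih =>
    rw [loopA]
    by_cases h : editDistanceA (PySem.List.pyGetD t1 a []) (PySem.List.pyGetD t2 a []) > 3 <;>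
      simp [h, ih]

lemma all_pyRange_zip {α : Type} (t1 t2 : List α) (dflt : α) (f : α → α → Bool)
    (h : t1.length = t2.length) :
    (PySem.List.pyRange 0 (t1.length : Int) 1).all
        (fun i => f (PySem.List.pyGetD t1 i dflt) (PySem.List.pyGetD t2 i dflt))
      = (t1.zip t2).all (fun p => f p.1 p.2) := by
  rw [PySem.List.pyRange_zero_nat, List.all_map]
  simp only [Function.comp_def, PySem.List.pyGetD_natCast]
  induction t1 generalizing t2 with
  | nil => simp
  | cons a t1 ih =>
    cases t2 with
    | nil => simp at h
    | cons b t2 =>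
      rw [List.length_cons, List.range_succ_eq_map, List.all_cons, List.all_map]
      simp only [Function.comp_def, Nat.succ_eq_add_one, List.getD_cons_succ, List.getD_cons_zero]
      rw [ih t2 (by simpa using h)]
      simp

-- ==== A side: the dict DP computes dref (full proof) ====
def InvA (s1 s2 : List Char) (d : PySem.Dict (Int × Int) Int) (r : Nat) : Prop :=
  ∀ i j : Nat, i ≤ s1.length → j ≤ s2.length → (j = 0 ∨ i ≤ r) →
    d.getD ((i : Int), (j : Int)) 0 = dref s1 s2 i j

lemma getD_foldl_insert_notkey (l : List Int) (k : Int → Int × Int)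
    (f : PySem.Dict (Int × Int) Int → Int → Int) (d : PySem.Dict (Int × Int) Int)
    (key : Int × Int) (h : ∀ x ∈ l, k x ≠ key) :
    (l.foldl (fun d x => d.insert (k x) (f d x)) d).getD key 0 = d.getD key 0 := by
  induction l generalizing d with
  | nil => rfl
  | cons a l ih =>
    simp only [List.foldl_cons]
    rw [ih _ (fun x hx => h x (by simp [hx]))]
    rw [PySem.Dict.getD_insert]
    rw [if_neg (Ne.symm (h a (by simp)))]

lemma getD_init_fold (g : Int → Int × Int) (hg : Function.Injective g) (d0 : PySem.Dict (Int × Int) Int)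
    (b : Int) (x : Int) (hx : 0 ≤ x) (hxb : x < b) :
    ((PySem.List.pyRange 0 b 1).foldl (fun d i => d.insert (g i) i) d0).getD (g x) 0 = x := by
  rw [PySem.List.pyRange_one_append 0 (x + 1) b (by omega) (by omega), List.foldl_append]
  rw [getD_foldl_insert_notkey _ _ _ _ _ (fun y hy => by
    have := (PySem.List.mem_pyRange_one).mp hy
    exact fun he => absurd (hg he) (by omega))]
  rw [PySem.List.pyRange_one_succ_right (a := 0) (b := x) (by omega), List.foldl_append,
    List.foldl_cons, List.foldl_nil, PySem.Dict.getD_insert, if_pos rfl]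

lemma invA_init (s1 s2 : List Char) :
    InvA s1 s2
      (((PySem.List.pyRange 0 ((s2.length : Int) + 1) 1).foldl (fun d j => d.insert ((0 : Int), j) j)
        ((PySem.List.pyRange 0 ((s1.length : Int) + 1) 1).foldl (fun d i => d.insert (i, (0 : Int)) i)
          PySem.Dict.empty))) 0 := by
  intro i j hi hj hcond
  have hij : j = 0 ∨ i = 0 := by omega
  rcases hij with h0 | h0
  · subst h0
    by_cases hiz : i = 0
    · subst hiz
      have := getD_init_fold (fun j => ((0 : Int), j))
        (fun a b h => by simpa using h)
        ((PySem.List.pyRange 0 ((s1.length : Int) + 1) 1).foldl (fun d i => d.insert (i, (0 : Int)) i)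
          PySem.Dict.empty) ((s2.length : Int) + 1) 0 (by omega) (by omega)
      simpa [dref_zero] using this
    · rw [getD_foldl_insert_notkey _ (fun j => ((0 : Int), j)) (fun _ j => j) _ _
        (fun y _ => by
          intro he
          have : (0 : Int) = (i : Nat) := congrArg Prod.fst he
          omega)]
      have := getD_init_fold (fun x => (x, (0 : Int)))
        (fun a b h => by simpa using h)
        PySem.Dict.empty ((s1.length : Int) + 1) (i : Int) (by omega) (by omega)
      rw [dref_zero']
      exact this
  · subst h0
    have := getD_init_fold (fun x => ((0 : Int), x))
      (fun a b h => by simpa using h)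
      ((PySem.List.pyRange 0 ((s1.length : Int) + 1) 1).foldl (fun d i => d.insert (i, (0 : Int)) i)
        PySem.Dict.empty) ((s2.length : Int) + 1) (j : Int) (by omega) (by omega)
    rw [dref_zero]
    exact this

def InvR (s1 s2 : List Char) (d : PySem.Dict (Int × Int) Int) (r t : Nat) : Prop :=
  ∀ i j : Nat, i ≤ s1.length → j ≤ s2.length → (j = 0 ∨ i ≤ r ∨ (i = r + 1 ∧ j ≤ t)) →
    d.getD ((i : Int), (j : Int)) 0 = dref s1 s2 i j

lemma invA_row_aux (s1 s2 : List Char) (r : Nat) (hr : r < s1.length)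
    (d : PySem.Dict (Int × Int) Int) (hd : InvA s1 s2 d r)
    (t : Nat) (ht : t ≤ s2.length) :
    InvR s1 s2 ((PySem.List.pyRange 1 ((t : Int) + 1) 1).foldl
      (stepA s1 s2 ((r : Int) + 1)) d) r t := by
  induction t with
  | zero =>
      rw [PySem.List.pyRange_one_eq_nil (a := 1) (b := ((0 : Nat) : Int) + 1) (by simp)]
      intro i j hi hj hcond
      exact hd i j hi hj (by omega)
  | succ t ih =>
      push_cast
      rw [PySem.List.pyRange_one_succ_right (a := 1) (b := (t : Int) + 1) (by omega),
        List.foldl_append, List.foldl_cons, List.foldl_nil]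
      rw [show ((t : Int) + 1) = ((t + 1 : Nat) : Int) from by push_cast; ring] at *
      have iht := ih (by omega)
      intro i j hi hj hcond
      simp only [stepA]
      rw [PySem.Dict.getD_insert]
      by_cases hk : ((i : Int), (j : Int)) = (((r : Int) + 1), ((t + 1 : Nat) : Int))
      · rw [if_pos hk]
        have hi' : i = r + 1 := by
          have := congrArg Prod.fst hk; simp at this; omega
        have hj' : j = t + 1 := by
          have := congrArg Prod.snd hk; simp at this; omega
        subst hi' hj'
        rw [show (((t + 1 : Nat) : Int)) - 1 = ((t : Nat) : Int) from by push_cast; ring]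
        rw [show (((r : Nat) : Int) + 1) - 1 = ((r : Nat) : Int) from by ring]
        have h1 := iht (r + 1) t (by omega) (by omega) (by omega)
        have h2 := iht r (t + 1) (by omega) (by omega) (by omega)
        have h3 := iht r t (by omega) (by omega) (by omega)
        push_cast at h1 h2 h3 ⊢
        rw [h1, h2, h3]
        rw [PySem.List.pyGetD_natCast, PySem.List.pyGetD_natCast]
        rw [show dref s1 s2 (r + 1) (t + 1)
              = min (min (dref s1 s2 (r + 1) t + 1) (dref s1 s2 r (t + 1) + 1))
                  (dref s1 s2 r t + (if s1.getD r ' ' = s2.getD t ' ' then 0 else 1)) from by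
          rw [dref]]
      · rw [if_neg hk]
        refine iht i j hi hj ?_
        rcases hcond with h | h | ⟨h1, h2⟩
        · omega
        · omega
        · right; right
          refine ⟨h1, ?_⟩
          by_contra hlt
          have : j = t + 1 := by omega
          exact hk (by subst h1 this; push_cast; rfl)

lemma foldl_id_int (l : List Int) (x : Int) : l.foldl (fun j _ => j) x = x := by
  induction l generalizing x with
  | nil => rfl
  | cons a l ih => simp [List.foldl_cons, ih]

lemma foldl_const_int (l : List Int) (c x : Int) :
    l.foldl (fun _ _ => c) x = if l.isEmpty then x else c := by
  induction l generalizing x with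
  | nil => rfl
  | cons a l ih => cases l <;> simp_all

lemma foldl_thread_fst {σ : Type} (l : List Int) (f : σ → Int → σ) (s : σ) (j : Int) :
    (l.foldl (fun p x => (f p.1 x, x)) (s, j)).1 = l.foldl f s := by
  induction l generalizing s j with
  | nil => rfl
  | cons a l ih => simp only [List.foldl_cons]; exact ih _ _

lemma getD_getLast?_ne_nil {α : Type} (l : List α) (h : l ≠ []) (x y : α) :
    l.getLast?.getD x = l.getLast?.getD y := by
  cases hl : l.getLast? with
  | some v => rfl
  | none => exact absurd (List.getLast?_eq_none_iff.mp hl) h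

lemma foldl_thread_snd {σ : Type} (l : List Int) (f : σ → Int → σ) (s : σ) (j : Int) :
    (l.foldl (fun p x => (f p.1 x, x)) (s, j)).2 = l.getLast?.getD j := by
  induction l generalizing s j with
  | nil => rfl
  | cons a l ih =>
    rw [List.foldl_cons, ih]
    cases l with
    | nil => simp
    | cons b t => exact getD_getLast?_ne_nil _ (by simp) _ _

lemma pyRange_getLast (a b : Int) (h : a < b) :
    (PySem.List.pyRange a b 1).getLast? = some (b - 1) := by
  have hb : b = (b - 1) + 1 := by ring
  rw [hb, PySem.List.pyRange_one_succ_right (by omega)]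
  simp

lemma outerA_fst (s1 s2 : List Char) (n : Int) (l : List Int)
    (d : PySem.Dict (Int × Int) Int) (i0 j0 : Int) :
    (l.foldl
      (fun p i =>
        (((PySem.List.pyRange 1 n 1).foldl (fun q j => (stepA s1 s2 i q.1 j, j)) (p.1, p.2.2)).1, i,
         ((PySem.List.pyRange 1 n 1).foldl (fun q j => (stepA s1 s2 i q.1 j, j)) (p.1, p.2.2)).2))
      (d, i0, j0)).1
    = l.foldl (fun d i => (PySem.List.pyRange 1 n 1).foldl (stepA s1 s2 i) d) d := by
  induction l generalizing d i0 j0 with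
  | nil => rfl
  | cons a l ih =>
    simp only [List.foldl_cons]
    rw [ih, foldl_thread_fst]

lemma outerA_i (s1 s2 : List Char) (n : Int) (l : List Int)
    (d : PySem.Dict (Int × Int) Int) (i0 j0 : Int) :
    (l.foldl
      (fun p i =>
        (((PySem.List.pyRange 1 n 1).foldl (fun q j => (stepA s1 s2 i q.1 j, j)) (p.1, p.2.2)).1, i,
         ((PySem.List.pyRange 1 n 1).foldl (fun q j => (stepA s1 s2 i q.1 j, j)) (p.1, p.2.2)).2))
      (d, i0, j0)).2.1
    = l.getLast?.getD i0 := by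
  induction l generalizing d i0 j0 with
  | nil => rfl
  | cons a l ih =>
    rw [List.foldl_cons, ih]
    cases l with
    | nil => simp
    | cons b t => exact getD_getLast?_ne_nil _ (by simp) _ _

lemma outerA_j (s1 s2 : List Char) (n : Int) (l : List Int)
    (d : PySem.Dict (Int × Int) Int) (i0 j0 : Int) :
    (l.foldl
      (fun p i =>
        (((PySem.List.pyRange 1 n 1).foldl (fun q j => (stepA s1 s2 i q.1 j, j)) (p.1, p.2.2)).1, i,
         ((PySem.List.pyRange 1 n 1).foldl (fun q j => (stepA s1 s2 i q.1 j, j)) (p.1, p.2.2)).2))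
      (d, i0, j0)).2.2
    = l.foldl (fun j _ => (PySem.List.pyRange 1 n 1).getLast?.getD j) j0 := by
  induction l generalizing d i0 j0 with
  | nil => rfl
  | cons a l ih =>
    simp only [List.foldl_cons]
    rw [ih, foldl_thread_snd]

lemma invA_main (s1 s2 : List Char) (r : Nat) (hr : r ≤ s1.length) :
    InvA s1 s2
      ((PySem.List.pyRange 1 ((r : Int) + 1) 1).foldl
        (fun d i => (PySem.List.pyRange 1 ((s2.length : Int) + 1) 1).foldl (stepA s1 s2 i) d)
        (((PySem.List.pyRange 0 ((s2.length : Int) + 1) 1).foldl (fun d j => d.insert ((0 : Int), j) j)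
          ((PySem.List.pyRange 0 ((s1.length : Int) + 1) 1).foldl (fun d i => d.insert (i, (0 : Int)) i)
            PySem.Dict.empty)))) r := by
  induction r with
  | zero =>
      rw [PySem.List.pyRange_one_eq_nil (a := 1) (b := ((0 : Nat) : Int) + 1) (by simp)]
      exact invA_init s1 s2
  | succ r ih =>
      push_cast
      rw [PySem.List.pyRange_one_succ_right (a := 1) (b := (r : Int) + 1) (by omega),
        List.foldl_append]
      simp only [List.foldl_cons, List.foldl_nil]
      have hprev : InvA s1 s2
          ((PySem.List.pyRange 1 ((r : Int) + 1) 1).foldl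
            (fun d i => (PySem.List.pyRange 1 ((s2.length : Int) + 1) 1).foldl (stepA s1 s2 i) d)
            (((PySem.List.pyRange 0 ((s2.length : Int) + 1) 1).foldl (fun d j => d.insert ((0 : Int), j) j)
              ((PySem.List.pyRange 0 ((s1.length : Int) + 1) 1).foldl (fun d i => d.insert (i, (0 : Int)) i)
                PySem.Dict.empty)))) r := by push_cast at ih ⊢; exact ih (by omega)
      have haux := invA_row_aux s1 s2 r (by omega) _ hprev s2.length (le_refl _)
      intro i j hi hj hcond
      exact haux i j hi hj (by omega)

lemma rowT_fst (l : List Int) (d : PySem.Dict (Int × Int) Int) (j0 : Int) :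
    (l.foldl (fun p i => (p.1.insert (i, (0 : Int)) i, i)) (d, j0)).1
      = l.foldl (fun d i => d.insert (i, (0 : Int)) i) d := by
  induction l generalizing d j0 with
  | nil => rfl
  | cons a l ih => simp only [List.foldl_cons]; exact ih _ _

lemma rowT_snd (l : List Int) (d : PySem.Dict (Int × Int) Int) (j0 : Int) :
    (l.foldl (fun p i => (p.1.insert (i, (0 : Int)) i, i)) (d, j0)).2 = l.getLast?.getD j0 := by
  induction l generalizing d j0 with
  | nil => rfl
  | cons a l ih =>
    rw [List.foldl_cons, ih]
    cases l with
    | nil => simp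
    | cons b t => exact getD_getLast?_ne_nil _ (by simp) _ _

lemma colT_fst (l : List Int) (d : PySem.Dict (Int × Int) Int) (j0 : Int) :
    (l.foldl (fun p j => (p.1.insert ((0 : Int), j) j, j)) (d, j0)).1
      = l.foldl (fun d j => d.insert ((0 : Int), j) j) d := by
  induction l generalizing d j0 with
  | nil => rfl
  | cons a l ih => simp only [List.foldl_cons]; exact ih _ _

lemma colT_snd (l : List Int) (d : PySem.Dict (Int × Int) Int) (j0 : Int) :
    (l.foldl (fun p j => (p.1.insert ((0 : Int), j) j, j)) (d, j0)).2 = l.getLast?.getD j0 := by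
  induction l generalizing d j0 with
  | nil => rfl
  | cons a l ih =>
    rw [List.foldl_cons, ih]
    cases l with
    | nil => simp
    | cons b t => exact getD_getLast?_ne_nil _ (by simp) _ _

lemma editDistanceA_eq_dref (s1 s2 : List Char) :
    editDistanceA s1 s2 = dref s1 s2 s1.length s2.length := by
  simp only [editDistanceA]
  rw [outerA_fst, outerA_i, outerA_j]
  rw [rowT_fst, rowT_snd, colT_fst, colT_snd]
  have hI : (PySem.List.pyRange 1 ((s1.length : Int) + 1) 1).getLast?.getD
      ((PySem.List.pyRange 0 ((s1.length : Int) + 1) 1).getLast?.getD 0) = (s1.length : Int) := by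
    rcases Nat.eq_zero_or_pos s1.length with h | h
    · rw [h, PySem.List.pyRange_one_eq_nil (by simp), pyRange_getLast 0 _ (by simp)]
      simp
    · rw [pyRange_getLast 1 _ (by omega)]
      simp
  have hJ : (PySem.List.pyRange 1 ((s1.length : Int) + 1) 1).foldl
      (fun j _ => (PySem.List.pyRange 1 ((s2.length : Int) + 1) 1).getLast?.getD j)
      ((PySem.List.pyRange 0 ((s2.length : Int) + 1) 1).getLast?.getD 0) = (s2.length : Int) := by
    rw [pyRange_getLast 0 _ (by omega)]
    rcases Nat.eq_zero_or_pos s2.length with h | h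
    · rw [h]
      rw [PySem.List.pyRange_one_eq_nil (a := 1) (b := ((0:Nat):Int) + 1) (by simp)]
      simp only [List.getLast?_nil, Option.getD_none]
      rw [foldl_id_int]
      simp
    · rw [pyRange_getLast 1 _ (by omega)]
      simp only [Option.getD_some]
      rw [show ((s2.length : Int) + 1 - 1) = (s2.length : Int) from by ring]
      rw [foldl_const_int]
      split_ifs <;> simp
  rw [hI, hJ]
  have := invA_main s1 s2 s1.length (le_refl _) s1.length s2.length (le_refl _) (le_refl _) (by omega)
  exact this

theorem response_match_tescase_eq (response testcase : String) :
    response_match_tescase response testcase = response_match_tescase_alt response testcase := by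
  unfold response_match_tescase response_match_tescase_alt
  set t1 := PySem.Chars.splitOn response.toList [' '] with ht1
  set t2 := PySem.Chars.splitOn testcase.toList [' '] with ht2
  by_cases h : t1.length = t2.length
  · rw [if_neg (by simpa using h), if_neg (by simpa using h)]
    have hz := all_pyRange_zip t1 t2 [] (fun a b => withinB a b 3) h
    rw [loopA_eq_all, ← hz]
    refine List.all_congr rfl fun i => ?_
    show _ = withinB _ _ 3
    rw [editDistanceA_eq_dref, withinB_eq 3 _ _ 3 (by norm_num)]
    simp only [gt_iff_lt, ← decide_not, not_lt]
  · rw [if_pos (by simpa using h), if_pos (by simpa using h)]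

-- ===== VERDICT (by name: the statement is the Claim_ definition above) =====
theorem response_match_tescase_spec : Claim_equal_response_match_tescase := by
  intro response testcase _
  unfold Spec_response_match_tescase
  exact response_match_tescase_eq response testcase
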